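-- pv_equiv track=rewrite | github.com/anautio/Sanapeli | main.py | check_if_contiguous
-- ===== SOURCE A (Python) =====
-- def check_if_contiguous(squares):
--     if not squares:  # squares.any()
--         return True
--     squares_copy = squares.copy()
--     q = [squares[0]]
--     connected_squares = set()
--
--     while q:
--         coord = q[0]
--         q.remove(coord)
--         if coord in squares_copy:
--             squares_copy.remove(coord)
--         connected_squares.add(tuple(coord))
--         if [coord[0] + 1, coord[1]] in squares_copy:
--             q.append([coord[0] + 1, coord[1]])
--         if [coord[0] - 1, coord[1]] in squares_copy:
--             q.append([coord[0] - 1, coord[1]])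
--         if [coord[0], coord[1] + 1] in squares_copy:
--             q.append([coord[0], coord[1] + 1])
--         if [coord[0], coord[1] - 1] in squares_copy:
--             q.append([coord[0], coord[1] - 1])
--     if len(connected_squares) == len(squares):
--         return True
--     else:
--         return False
-- ===== SOURCE B (Python) =====
-- def check_if_contiguous(squares):
--     if not squares:
--         return True
--     cells = {tuple(sq) for sq in squares}
--     reached = {tuple(squares[0])}
--     while True:
--         grown = cells & {(c[0] + dx, c[1] + dy) for c in reached
--                          for dx, dy in ((1, 0), (-1, 0), (0, 1), (0, -1))}
--         if grown <= reached:
--             break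
--         reached |= grown
--     return len(reached) == len(squares)
-- ===== Notes on version B (the rewrite author's own statement) =====
-- stated objective: alternative
-- what changed: Replaces A's worklist search (pop a queue cell, scan and remove it from a list copy, conditionally append each of its four neighbours) by a round-based monotone fixpoint iteration: each round intersects the one-step neighbour image of the whole reached set with the cell set and unions it in, stopping when nothing new appears; there is no queue, no per-cell visit and no removal.
import Mathlib
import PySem

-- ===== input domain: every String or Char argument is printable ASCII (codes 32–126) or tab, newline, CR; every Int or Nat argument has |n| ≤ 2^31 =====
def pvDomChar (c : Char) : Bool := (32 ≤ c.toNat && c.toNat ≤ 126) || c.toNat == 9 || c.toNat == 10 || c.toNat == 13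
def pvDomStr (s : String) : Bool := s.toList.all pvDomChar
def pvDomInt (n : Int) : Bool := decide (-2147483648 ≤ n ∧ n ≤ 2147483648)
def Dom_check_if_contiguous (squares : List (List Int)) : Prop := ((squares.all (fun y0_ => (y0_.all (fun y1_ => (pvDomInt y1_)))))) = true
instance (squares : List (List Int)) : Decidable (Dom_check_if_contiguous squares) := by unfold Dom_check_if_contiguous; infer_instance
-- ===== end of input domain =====

-- B replaces A's queue-based search (pop a cell, scan and remove from a list copy, append
-- neighbours) by a round-based fixpoint iteration: grow the reached set by its whole one-step
-- neighbour image intersected with the cell set until nothing new appears; no queue, no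
-- per-cell visit, no removal. Return values agree on Pre_.

-- ===== PORT A =====
-- 'if [nb] in squares_copy: q.append([nb])' — one conditional append
def appendIfMem (copy : List (List Int)) (q : List (List Int)) (nb : List Int) : List (List Int) :=
  if nb ∈ copy then q ++ [nb] else q

-- termination helper for the A loop (appended neighbours are members of copy, so they do not
-- count towards the not-in-copy measure)
theorem filter_appendIfMem (copy q : List (List Int)) (nb : List Int) :
    (appendIfMem copy q nb).filter (fun e => decide (e ∉ copy)) =
      q.filter (fun e => decide (e ∉ copy)) := by
  unfold appendIfMem
  split_ifs with h
  · simp [List.filter_append, h]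
  · rfl

-- the 'while q:' loop of A; state: squares_copy, q, connected_squares
def checkLoopA (copy : List (List Int)) (q : List (List Int)) (conn : PySem.Set (List Int)) :
    PySem.Set (List Int) :=
  match q with
  | [] => conn
  | coord :: qrest =>        -- coord = q[0]; q.remove(coord) drops this first occurrence
    let copy' := if coord ∈ copy then ((PySem.List.remove? copy coord).getD copy) else copy
    let conn' := PySem.Set.add conn coord
    match PySem.List.pyGet? coord 0, PySem.List.pyGet? coord 1 with
    | some x, some y =>      -- coord[0], coord[1]
      let q4 := appendIfMem copy' (appendIfMem copy' (appendIfMem copy'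
                  (appendIfMem copy' qrest [x + 1, y]) [x - 1, y]) [x, y + 1]) [x, y - 1]
      checkLoopA copy' q4 conn'
    | _, _ => conn'          -- coord[0]/coord[1]: IndexError in Python; outside Pre_
  termination_by (copy.length, (q.filter (fun e => decide (e ∉ copy))).length)
  decreasing_by
    by_cases h : coord ∈ copy
    · apply Prod.Lex.left
      rw [dif_pos h, PySem.List.remove?_eq_some_erase copy coord h, Option.getD_some]
      have h1 := List.length_erase_of_mem h
      have h2 : 0 < copy.length := List.length_pos_of_mem h
      omega
    · rw [dif_neg h]
      apply Prod.Lex.right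
      rw [filter_appendIfMem, filter_appendIfMem, filter_appendIfMem, filter_appendIfMem,
        List.filter_cons]
      split_ifs with hc
      · simp only [List.length_cons]; omega
      · simp at hc
        exact absurd hc h


def check_if_contiguous (squares : List (List Int)) : Bool :=
  match squares with
  | [] => true                      -- 'if not squares: return True'
  | s0 :: _ =>
    let conn := checkLoopA squares [s0] PySem.Set.empty
    PySem.Set.len conn == PySem.List.len squares

-- ===== PORT B =====
-- '((c[0]+dx, c[1]+dy) for dx, dy in ...)': the four grid neighbours of one reached cell
def nbrs4 (c : List Int) : List (List Int) :=
  match PySem.List.pyGet? c 0, PySem.List.pyGet? c 1 with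
  | some x, some y => [[x + 1, y], [x - 1, y], [x, y + 1], [x, y - 1]]
  | _, _ => []               -- c[0]/c[1]: IndexError in Python; outside Pre_

-- 'cells & {comprehension over reached}': the one-step neighbour image of the reached set
def grownOf (cells reached : PySem.Set (List Int)) : PySem.Set (List Int) :=
  PySem.Set.inter cells (PySem.Set.ofList ((reached : List (List Int)).flatMap nbrs4))

-- the 'while True:' fixpoint loop of B: stop when grown <= reached, else reached |= grown
def loopB (cells reached : PySem.Set (List Int)) : PySem.Set (List Int) :=
  if hsub : PySem.Set.issubset (grownOf cells reached) reached = true then reached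
  else loopB cells (PySem.Set.union reached (grownOf cells reached))
  termination_by ((cells : List (List Int)).toFinset \
    ((reached : List (List Int)).toFinset)).card
  decreasing_by
    have hne : ¬ (∀ x ∈ (grownOf cells reached : List (List Int)),
        x ∈ (reached : List (List Int))) := by
      intro hall
      exact hsub ((PySem.Set.issubset_iff _ _).mpr hall)
    push Not at hne
    obtain ⟨e, he, hen⟩ := hne
    have hec : e ∈ (cells : List (List Int)) :=
      ((PySem.Set.mem_inter _ _ e).mp he).1
    apply Finset.card_lt_card
    have hsubty : ((cells : List (List Int)).toFinset \
        ((PySem.Set.union reached (grownOf cells reached) : List (List Int)).toFinset)) ⊆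
        ((cells : List (List Int)).toFinset \ ((reached : List (List Int)).toFinset)) := by
      intro x hx
      rw [Finset.mem_sdiff] at hx ⊢
      refine ⟨hx.1, fun hxr => hx.2 ?_⟩
      rw [List.mem_toFinset] at hxr ⊢
      exact (PySem.Set.mem_union _ _ x).mpr (Or.inl hxr)
    refine (Finset.ssubset_iff_of_subset hsubty).mpr ⟨e, ?_, ?_⟩
    · rw [Finset.mem_sdiff, List.mem_toFinset, List.mem_toFinset]
      exact ⟨hec, hen⟩
    · rw [Finset.mem_sdiff, List.mem_toFinset]
      intro hx
      exact hx.2 (List.mem_toFinset.mpr ((PySem.Set.mem_union _ _ e).mpr (Or.inr he)))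

def check_if_contiguous_alt (squares : List (List Int)) : Bool :=
  match squares with
  | [] => true                      -- 'if not squares: return True'
  | s0 :: rest =>
    let cells := PySem.Set.ofList (s0 :: rest)
    let reached := loopB cells (PySem.Set.add PySem.Set.empty s0)   -- reached = {start}
    PySem.Set.len reached == PySem.List.len (s0 :: rest)

-- ===== PRECONDITION & SPEC =====
-- Pre_ excludes exactly the inputs where Python A raises IndexError: a nonempty list whose FIRST
-- square has fewer than two coordinates (coord[0]/coord[1] fails; B raises there too).
def Pre_check_if_contiguous (squares : List (List Int)) : Prop :=
  squares ≠ [] → 2 ≤ (squares.headD []).length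
instance (squares : List (List Int)) : Decidable (Pre_check_if_contiguous squares) := by
  unfold Pre_check_if_contiguous; infer_instance
def pvWitness_check_if_contiguous : List (List Int) := [[0, 0], [0, 1]]

def Spec_check_if_contiguous (squares : List (List Int)) (out : Bool) : Prop := out = check_if_contiguous_alt squares
instance (squares : List (List Int)) (out : Bool) : Decidable (Spec_check_if_contiguous squares out) := by unfold Spec_check_if_contiguous; infer_instance

-- ===== CLAIM (what is proved, stated in full; the proofs are below) =====
def Claim_equal_check_if_contiguous : Prop := ∀ (squares : List (List Int)), Dom_check_if_contiguous squares → Pre_check_if_contiguous squares → Spec_check_if_contiguous squares (check_if_contiguous squares)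

-- ===== LEMMAS AND PROOFS =====

-- grid adjacency and reachability inside the list of squares
def nbrsOf (x y : Int) : List (List Int) := [[x + 1, y], [x - 1, y], [x, y + 1], [x, y - 1]]

def Adj (c d : List Int) : Prop := ∃ x y t, c = x :: y :: t ∧ d ∈ nbrsOf x y

def Step (squares : List (List Int)) (c d : List Int) : Prop := Adj c d ∧ d ∈ squares

def Reach (squares : List (List Int)) (s c : List Int) : Prop :=
  Relation.ReflTransGen (Step squares) s c

theorem adj_cons (x y : Int) (t : List Int) (d : List Int) :
    Adj (x :: y :: t) d ↔ d ∈ nbrsOf x y := by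
  constructor
  · rintro ⟨x', y', t', heq, hm⟩
    obtain ⟨rfl, rfl, rfl⟩ : x = x' ∧ y = y' ∧ t = t' := by
      simpa using heq
    exact hm
  · intro hm; exact ⟨x, y, t, rfl, hm⟩

theorem mem_of_reach (squares : List (List Int)) (s0 : List Int) (r : List (List Int))
    (h0 : s0 ∈ r) (hcl : ∀ c ∈ r, ∀ d, Step squares c d → d ∈ r) :
    ∀ c, Reach squares s0 c → c ∈ r := by
  intro c h
  induction h with
  | refl => exact h0
  | tail _ hstep ih => exact hcl _ ih _ hstep

-- membership in A's conditional appends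
theorem mem_appendIfMem (copy q : List (List Int)) (nb e : List Int) :
    e ∈ appendIfMem copy q nb ↔ e ∈ q ∨ (nb ∈ copy ∧ e = nb) := by
  unfold appendIfMem
  split_ifs with h <;> simp [h]

-- coord[0] = x and coord[1] = y force the shape x :: y :: t
theorem shape_of_pyGet (coord : List Int) (x y : Int)
    (h0 : PySem.List.pyGet? coord 0 = some x) (h1 : PySem.List.pyGet? coord 1 = some y) :
    ∃ t, coord = x :: y :: t := by
  rcases coord with _ | ⟨a, _ | ⟨b, t⟩⟩
  · rw [show PySem.List.pyGet? ([] : List Int) 0 = none from by decide] at h0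
    simp at h0
  · rw [PySem.List.pyGet?_of_nonneg _ (by norm_num : (0:Int) ≤ 1)] at h1
    simp at h1
  · refine ⟨t, ?_⟩
    rw [PySem.List.pyGet?_zero] at h0
    rw [PySem.List.pyGet?_of_nonneg _ (by norm_num : (0:Int) ≤ 1)] at h1
    simp at h0 h1
    simp [h0, h1]

theorem pyGet_of_shape (x y : Int) (t : List Int) :
    PySem.List.pyGet? (x :: y :: t) 0 = some x ∧ PySem.List.pyGet? (x :: y :: t) 1 = some y := by
  constructor
  · rw [PySem.List.pyGet?_zero]
    rfl
  · rw [PySem.List.pyGet?_of_nonneg _ (by norm_num : (0:Int) ≤ 1)]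
    simp

-- the main invariant lemma for A's loop
set_option maxHeartbeats 1000000 in
theorem loopA_inv (squares : List (List Int)) (s0 : List Int) :
    ∀ (copy q : List (List Int)) (conn : PySem.Set (List Int)),
      (∀ d ∈ squares, d ∈ copy ∨ d ∈ conn) →
      (∀ c ∈ copy, c ∈ squares) →
      (∀ c ∈ q, Reach squares s0 c) →
      (∀ c ∈ q, 2 ≤ c.length) →
      (∀ c ∈ conn, Reach squares s0 c) →
      (∀ c ∈ conn, ∀ d, Step squares c d → d ∈ conn ∨ d ∈ q) →
      (conn : List (List Int)).Nodup →
      (∀ c ∈ conn, c ∈ checkLoopA copy q conn) ∧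
      (∀ c ∈ q, c ∈ checkLoopA copy q conn) ∧
      (∀ c ∈ checkLoopA copy q conn, Reach squares s0 c) ∧
      (∀ c ∈ checkLoopA copy q conn, ∀ d, Step squares c d → d ∈ checkLoopA copy q conn) ∧
      (checkLoopA copy q conn : List (List Int)).Nodup := by
  intro copy q conn
  induction copy, q, conn using checkLoopA.induct with
  | case1 copy conn =>
    intro _ _ _ _ H5 H6 H7
    rw [checkLoopA]
    refine ⟨fun c hc => hc, by simp, H5, fun c hc d hd => ?_, H7⟩
    rcases H6 c hc d hd with h | h
    · exact h
    · simp at h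
  | case2 copy conn coord qrest copy' conn' x y hy1 hx0 q4 ihA =>
    intro H1 H2 H3 H4 H5 H6 H7
    obtain ⟨tl, rfl⟩ := shape_of_pyGet coord x y hx0 hy1
    have hcoordR : Reach squares s0 (x :: y :: tl) := H3 _ (by simp)
    have hq4mem : ∀ e, e ∈ q4 ↔ e ∈ qrest ∨
        ([x + 1, y] ∈ copy' ∧ e = [x + 1, y]) ∨ ([x - 1, y] ∈ copy' ∧ e = [x - 1, y]) ∨
        ([x, y + 1] ∈ copy' ∧ e = [x, y + 1]) ∨ ([x, y - 1] ∈ copy' ∧ e = [x, y - 1]) := by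
      intro e
      simp only [q4, mem_appendIfMem, or_assoc]
    have hcopy'sub : ∀ c ∈ copy', c ∈ copy := by
      intro c hc
      simp only [copy'] at hc
      split_ifs at hc with hmem
      · rw [PySem.List.remove?_eq_some_erase copy _ hmem, Option.getD_some] at hc
        exact List.erase_subset hc
      · exact hc
    have hcov : ∀ d ∈ copy, d ∈ copy' ∨ d = x :: y :: tl := by
      intro d hd
      by_cases hdc : d = x :: y :: tl
      · right; exact hdc
      · left
        simp only [copy']
        split_ifs with hmem
        · rw [PySem.List.remove?_eq_some_erase copy _ hmem, Option.getD_some]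
          exact (List.mem_erase_of_ne hdc).mpr hd
        · exact hd
    have hconn'mem : ∀ e, e ∈ (conn' : List (List Int)) ↔ e ∈ (conn : List (List Int)) ∨
        e = x :: y :: tl := by
      intro e
      simp only [conn']
      exact PySem.Set.mem_add conn _ e
    have A7 : (conn' : List (List Int)).Nodup := by
      simp only [conn']
      exact PySem.Set.nodup_add conn _ H7
    have hstep : checkLoopA copy ((x :: y :: tl) :: qrest) conn = checkLoopA copy' q4 conn' := by
      rw [checkLoopA, hx0, hy1]
      rfl
    clear_value copy' conn' q4
    have A1 : ∀ d ∈ squares, d ∈ copy' ∨ d ∈ (conn' : List (List Int)) := by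
      intro d hd
      rcases H1 d hd with h | h
      · rcases hcov d h with h2 | h2
        · exact Or.inl h2
        · exact Or.inr ((hconn'mem d).mpr (Or.inr h2))
      · exact Or.inr ((hconn'mem d).mpr (Or.inl h))
    have A2 : ∀ c ∈ copy', c ∈ squares := fun c hc => H2 c (hcopy'sub c hc)
    have hnbstep : ∀ d ∈ copy', d ∈ nbrsOf x y → Reach squares s0 d := by
      intro d hd hnb
      exact Relation.ReflTransGen.tail hcoordR ⟨(adj_cons x y tl d).mpr hnb, H2 d (hcopy'sub d hd)⟩
    have A3 : ∀ c ∈ q4, Reach squares s0 c := by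
      intro c hc
      rcases (hq4mem c).mp hc with h | ⟨hm, rfl⟩ | ⟨hm, rfl⟩ | ⟨hm, rfl⟩ | ⟨hm, rfl⟩
      · exact H3 c (List.mem_cons_of_mem _ h)
      all_goals exact hnbstep _ hm (by simp [nbrsOf])
    have A4 : ∀ c ∈ q4, 2 ≤ c.length := by
      intro c hc
      rcases (hq4mem c).mp hc with h | ⟨_, rfl⟩ | ⟨_, rfl⟩ | ⟨_, rfl⟩ | ⟨_, rfl⟩
      · exact H4 c (List.mem_cons_of_mem _ h)
      all_goals simp
    have A5 : ∀ c ∈ (conn' : List (List Int)), Reach squares s0 c := by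
      intro c hc
      rcases (hconn'mem c).mp hc with h | rfl
      · exact H5 c h
      · exact hcoordR
    have A6 : ∀ c ∈ (conn' : List (List Int)), ∀ d, Step squares c d →
        d ∈ (conn' : List (List Int)) ∨ d ∈ q4 := by
      intro c hc d hd
      rcases (hconn'mem c).mp hc with hcc | rfl
      · rcases H6 c hcc d hd with h | h
        · exact Or.inl ((hconn'mem d).mpr (Or.inl h))
        · rcases List.mem_cons.mp h with h2 | h2
          · exact Or.inl ((hconn'mem d).mpr (Or.inr h2))
          · exact Or.inr ((hq4mem d).mpr (Or.inl h2))
      · obtain ⟨hadj, hdsq⟩ := hd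
        have hdnb : d ∈ nbrsOf x y := (adj_cons x y tl d).mp hadj
        by_cases hdc : d ∈ copy'
        · right
          rw [hq4mem]
          simp only [nbrsOf, List.mem_cons, List.not_mem_nil, or_false] at hdnb
          rcases hdnb with rfl | rfl | rfl | rfl <;> tauto
        · left
          rcases A1 d hdsq with h | h
          · exact absurd h hdc
          · exact h
    obtain ⟨I1, I2, I3, I4, I5⟩ := ihA A1 A2 A3 A4 A5 A6 A7
    rw [hstep]
    refine ⟨fun c hc => I1 c ((hconn'mem c).mpr (Or.inl hc)), fun c hc => ?_, I3, I4, I5⟩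
    rcases List.mem_cons.mp hc with h | h
    · exact I1 c ((hconn'mem c).mpr (Or.inr h))
    · exact I2 c ((hq4mem c).mpr (Or.inl h))
  | case3 copy conn coord qrest hne =>
    intro _ _ _ H4 _ _ _
    exfalso
    have hlen : 2 ≤ coord.length := H4 coord (by simp)
    obtain ⟨a, b, t, rfl⟩ : ∃ a b t, coord = a :: b :: t := by
      rcases coord with _ | ⟨a, _ | ⟨b, t⟩⟩
      · simp at hlen
      · simp at hlen
      · exact ⟨a, b, t, rfl⟩
    obtain ⟨g0, g1⟩ := pyGet_of_shape a b t
    exact hne a b g0 g1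

-- a member of the neighbour image comes from a well-shaped cell by one adjacency step
theorem mem_nbrs4 (c e : List Int) (he : e ∈ nbrs4 c) :
    ∃ x y t, c = x :: y :: t ∧ e ∈ nbrsOf x y := by
  unfold nbrs4 at he
  rcases h0 : PySem.List.pyGet? c 0 with _ | x
  · rw [h0] at he; simp at he
  · rcases h1 : PySem.List.pyGet? c 1 with _ | y
    · rw [h0, h1] at he; simp at he
    · rw [h0, h1] at he
      obtain ⟨t, rfl⟩ := shape_of_pyGet c x y h0 h1
      exact ⟨x, y, t, rfl, he⟩

-- the other direction: a well-shaped cell's image is exactly its four grid neighbours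
theorem nbrs4_of_shape (x y : Int) (t : List Int) : nbrs4 (x :: y :: t) = nbrsOf x y := by
  obtain ⟨g0, g1⟩ := pyGet_of_shape x y t
  unfold nbrs4
  rw [g0, g1]
  rfl

-- membership in the grown set
theorem mem_grownOf (cells reached : PySem.Set (List Int)) (e : List Int) :
    e ∈ (grownOf cells reached : List (List Int)) ↔
      e ∈ (cells : List (List Int)) ∧ ∃ c ∈ (reached : List (List Int)), e ∈ nbrs4 c := by
  unfold grownOf
  rw [PySem.Set.mem_inter, PySem.Set.mem_ofList, List.mem_flatMap]

-- the main invariant lemma for B's fixpoint loop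
theorem loopB_inv (squares : List (List Int)) (s0 : List Int)
    (cells : PySem.Set (List Int))
    (hcells : ∀ e, e ∈ (cells : List (List Int)) ↔ e ∈ squares) :
    ∀ (reached : PySem.Set (List Int)),
      (∀ c ∈ (reached : List (List Int)), Reach squares s0 c) →
      (reached : List (List Int)).Nodup →
      (∀ c ∈ (reached : List (List Int)), c ∈ (loopB cells reached : List (List Int))) ∧
      (∀ c ∈ (loopB cells reached : List (List Int)), Reach squares s0 c) ∧
      (∀ c ∈ (loopB cells reached : List (List Int)), ∀ d, Step squares c d →
        d ∈ (loopB cells reached : List (List Int))) ∧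
      (loopB cells reached : List (List Int)).Nodup := by
  intro reached
  induction reached using loopB.induct (cells := cells) with
  | case1 reached hsub =>
    intro H1 H2
    rw [loopB, dif_pos hsub]
    refine ⟨fun c hc => hc, H1, fun c hc d hd => ?_, H2⟩
    obtain ⟨hadj, hdsq⟩ := hd
    obtain ⟨x, y, t, rfl, hdnb⟩ := hadj
    have hdg : d ∈ (grownOf cells reached : List (List Int)) := by
      rw [mem_grownOf]
      exact ⟨(hcells d).mpr hdsq, ⟨x :: y :: t, hc, by rw [nbrs4_of_shape]; exact hdnb⟩⟩
    exact (PySem.Set.issubset_iff _ _).mp hsub d hdg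
  | case2 reached hsub ih =>
    intro H1 H2
    have hmemU : ∀ e, e ∈ (PySem.Set.union reached (grownOf cells reached) : List (List Int)) ↔
        e ∈ (reached : List (List Int)) ∨ e ∈ (grownOf cells reached : List (List Int)) :=
      fun e => PySem.Set.mem_union _ _ e
    have B1 : ∀ c ∈ (PySem.Set.union reached (grownOf cells reached) : List (List Int)),
        Reach squares s0 c := by
      intro c hc
      rcases (hmemU c).mp hc with h | h
      · exact H1 c h
      · rw [mem_grownOf] at h
        obtain ⟨hcc, c0, hc0, hnb⟩ := h
        obtain ⟨x, y, t, rfl, hnb'⟩ := mem_nbrs4 c0 c hnb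
        exact Relation.ReflTransGen.tail (H1 _ hc0)
          ⟨(adj_cons x y t c).mpr hnb', (hcells c).mp hcc⟩
    have B2 : (PySem.Set.union reached (grownOf cells reached) : List (List Int)).Nodup :=
      PySem.Set.nodup_union _ _ H2
    obtain ⟨I1, I2, I3, I4⟩ := ih B1 B2
    rw [loopB, dif_neg hsub]
    exact ⟨fun c hc => I1 c ((hmemU c).mpr (Or.inl hc)), I2, I3, I4⟩

-- ===== VERDICT (by name: the statement is the Claim_ definition above) =====
theorem check_if_contiguous_spec : Claim_equal_check_if_contiguous := by
  unfold Claim_equal_check_if_contiguous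
  intro squares _ hpre
  unfold Spec_check_if_contiguous
  match squares with
  | [] => rfl
  | s0 :: rest =>
    have hs0 : 2 ≤ s0.length := by
      have := hpre (by simp)
      simpa using this
    -- A's loop result
    obtain ⟨hAconn, hAq, hAsound, hAclosed, hAnodup⟩ :=
      loopA_inv (s0 :: rest) s0 (s0 :: rest) [s0] PySem.Set.empty
        (by intro d hd; exact Or.inl hd)
        (by intro c hc; exact hc)
        (by intro c hc; simp at hc; subst hc; exact Relation.ReflTransGen.refl)
        (by intro c hc; simp at hc; subst hc; exact hs0)
        (by intro c hc; simp [PySem.Set.empty] at hc)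
        (by intro c hc; simp [PySem.Set.empty] at hc)
        (by simp [PySem.Set.empty])
    -- B's loop result
    obtain ⟨hBsub, hBsound, hBclosed, hBnodup⟩ :=
      loopB_inv (s0 :: rest) s0 (PySem.Set.ofList (s0 :: rest))
        (fun e => PySem.Set.mem_ofList _ e) (PySem.Set.add PySem.Set.empty s0)
        (by intro c hc; rw [PySem.Set.mem_add] at hc
            rcases hc with hc | rfl
            · simp [PySem.Set.empty] at hc
            · exact Relation.ReflTransGen.refl)
        (by apply PySem.Set.nodup_add; simp [PySem.Set.empty])
    set rA := checkLoopA (s0 :: rest) [s0] PySem.Set.empty with hrA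
    set rB := loopB (PySem.Set.ofList (s0 :: rest)) (PySem.Set.add PySem.Set.empty s0) with hrB
    have hs0A : s0 ∈ rA := hAq s0 (by simp)
    have hs0B : s0 ∈ (rB : List (List Int)) :=
      hBsub s0 (by simp [PySem.Set.add, PySem.Set.empty])
    have hext : ∀ c, c ∈ rA ↔ c ∈ (rB : List (List Int)) := by
      intro c
      constructor
      · intro hc
        exact mem_of_reach _ s0 rB hs0B hBclosed c (hAsound c hc)
      · intro hc
        exact mem_of_reach _ s0 rA hs0A hAclosed c (hBsound c hc)
    have hperm : rA.Perm rB := (List.perm_ext_iff_of_nodup hAnodup hBnodup).mpr hext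
    have hlen : rA.length = (rB : List (List Int)).length := hperm.length_eq
    simp only [check_if_contiguous, check_if_contiguous_alt]
    simp only [PySem.Set.len, PySem.List.len, ← hrA, ← hrB, hlen]
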